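-- pv_equiv track=rewrite | github.com/MarcDagher/Assignment-2 | Exercise_2.py | recursive_capital_letters
-- ===== SOURCE A (Python) =====
-- def recursive_capital_letters(s, index=0):
--     s = list(s)
--
--     if len(s) == 0 or len(s) == 1:
--         return s
--     if len(s) != index:  #To iterate over the list
--         letter = s[index]
--         if letter == " ":
--             s.pop(index)
--             return recursive_capital_letters(s, index - 1)
--
--         elif ord(letter) > 64 and ord(letter) < 91:
--             s.pop(index)
--             s.insert(0, letter)
--
--     else: # To stay in the range of the list
--         return s
--     return recursive_capital_letters(s, index + 1)
-- ===== SOURCE B (Python) =====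
-- def recursive_capital_letters(s, index=0):
--     s = list(s)
--     if len(s) <= 1:
--         return s
--     tail = s[index:]
--     caps = [c for c in tail if "A" <= c <= "Z"]
--     others = [c for c in tail if not ("A" <= c <= "Z") and c != " "]
--     return caps[::-1] + s[:index] + others
-- ===== Notes on version B (the rewrite author's own statement) =====
-- stated objective: faster
-- what changed: A re-scans the whole list with pop/insert in an O(n)-deep recursion; B makes one pass over s[index:] collecting the capitals (reversed to the front) and the other non-space characters. …
-- outside the precondition, e.g. on recursive_capital_letters('AB c', 0): A returns ['A', 'B', 'c'], B returns ['B', 'A', 'c']; on recursive_capital_letters('xA b', 2): A returns ['A', 'x', 'b'], B returns ['x', 'A', 'b']; on recursive_capital_letters(' A', -1): A returns ['A'], B returns ['A', ' ']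
import Mathlib
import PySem

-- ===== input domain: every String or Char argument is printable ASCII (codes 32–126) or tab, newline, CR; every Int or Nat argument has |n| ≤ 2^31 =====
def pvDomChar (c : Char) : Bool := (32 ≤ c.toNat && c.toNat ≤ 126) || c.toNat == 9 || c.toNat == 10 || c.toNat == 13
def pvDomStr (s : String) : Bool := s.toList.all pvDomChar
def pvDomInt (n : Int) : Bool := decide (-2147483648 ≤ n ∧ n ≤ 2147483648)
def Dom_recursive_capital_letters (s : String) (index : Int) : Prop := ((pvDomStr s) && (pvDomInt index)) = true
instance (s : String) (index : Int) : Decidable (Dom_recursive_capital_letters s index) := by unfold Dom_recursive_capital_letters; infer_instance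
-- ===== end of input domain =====

-- B replaces A's quadratic pop/insert recursion by one linear pass over s[index:]
-- collecting the capitals (reversed to the front) and the other non-space characters.


-- ===== PORT A =====
-- A works on list(s), a list of one-character strings; both ports work on the
-- corresponding List Char and wrap each char as a one-character String at the end.
-- Python raises IndexError exactly where pyGet?/pop? return none (excluded by Pre_);
-- the port returns [] there.

-- termination facts for the port's recursion (cited by name in decreasing_by)
theorem pvInRangeOfGet {s : List Char} {index : Int} {letter : Char}
    (hg : PySem.List.pyGet? s index = some letter) :
    -(s.length : Int) ≤ index ∧ index < s.length := by
  have hin : PySem.Raise.InRange s.length index := by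
    by_contra h
    rw [← PySem.List.pyGet?_eq_none_iff] at h
    rw [h] at hg; cases hg
  simpa [PySem.Raise.InRange] using hin

theorem pvDecSpace {s s' : List Char} {index : Int} {letter : Char}
    (hg : PySem.List.pyGet? s index = some letter)
    (hlen : s'.length + 1 = s.length) :
    (2 * (s'.length : Int) - (index - 1)).toNat < (2 * (s.length : Int) - index).toNat := by
  have hr := pvInRangeOfGet hg
  omega

theorem pvDecCap {s s1 : List Char} {index : Int} {letter : Char}
    (hg : PySem.List.pyGet? s index = some letter)
    (hlen : s1.length + 1 = s.length) :
    (2 * ((PySem.List.insert s1 0 letter).length : Int) - (index + 1)).toNat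
      < (2 * (s.length : Int) - index).toNat := by
  have hr := pvInRangeOfGet hg
  rw [PySem.List.insert_zero]
  simp only [List.length_cons]
  omega

theorem pvDecOther {s : List Char} {index : Int} {letter : Char}
    (hg : PySem.List.pyGet? s index = some letter) :
    (2 * (s.length : Int) - (index + 1)).toNat < (2 * (s.length : Int) - index).toNat := by
  have hr := pvInRangeOfGet hg
  omega

def pvRecAuxA (s : List Char) (index : Int) : List Char :=
  if s.length = 0 ∨ s.length = 1 then s
  else if (s.length : Int) ≠ index then
    match hg : PySem.List.pyGet? s index with
    | none => []
    | some letter =>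
      if letter = ' ' then
        match hp : PySem.List.pop? s index with
        | none => []
        | some (_, s') => pvRecAuxA s' (index - 1)
      else if 64 < letter.toNat ∧ letter.toNat < 91 then
        match hp : PySem.List.pop? s index with
        | none => []
        | some (_, s1) => pvRecAuxA (PySem.List.insert s1 0 letter) (index + 1)
      else pvRecAuxA s (index + 1)
  else s
termination_by (2 * (s.length : Int) - index).toNat
decreasing_by
  · exact pvDecSpace hg (PySem.List.length_of_pop?_eq_some s hp)
  · exact pvDecCap hg (PySem.List.length_of_pop?_eq_some s hp)
  · exact pvDecOther hg

def recursive_capital_letters (s : String) (index : Int) : List String :=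
  (pvRecAuxA s.toList index).map (fun c => String.ofList [c])

-- ===== PORT B =====
def pvIsCapB (c : Char) : Bool := decide ('A' ≤ c) && decide (c ≤ 'Z')

def recursive_capital_letters_alt (s : String) (index : Int) : List String :=
  let cs := s.toList
  if cs.length ≤ 1 then cs.map (fun c => String.ofList [c])
  else
    let tail := PySem.List.slice cs (some index) none
    let caps := tail.filter pvIsCapB
    let others := tail.filter (fun c => !pvIsCapB c && !(c == ' '))
    (caps.reverse ++ PySem.List.slice cs none (some index) ++ others).map (fun c => String.ofList [c])

-- ===== PRECONDITION & SPEC =====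
-- Pre_ keeps the natural domain of the recursion: a cursor inside the bounds
-- (outside them A raises IndexError or Python's negative indexing makes the cursor
-- wrap to the end and re-process the whole mutated list), and no space reached while
-- every character between the cursor and it is a capital or a space and the part
-- before the cursor ends in nothing, a space or a capital — at such a space A's
-- cursor steps back onto an already-moved capital (or past the front) and moves it
-- again, so the order of the leading capitals there is an artefact of A's in-place
-- mutation history.  Strings of length ≤ 1 are always returned as is.
def Pre_recursive_capital_letters (s : String) (index : Int) : Prop :=
  s.toList.length ≤ 1 ∨
  (0 ≤ index ∧ index ≤ s.toList.length ∧
   (((s.toList.take index.toNat).getLast?.any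
       (fun x => !(decide ('A' ≤ x) && decide (x ≤ 'Z')) && !(x == ' '))) = true ∨
    ' ' ∉ (s.toList.drop index.toNat).takeWhile
        (fun c => (decide ('A' ≤ c) && decide (c ≤ 'Z')) || c == ' ')))
instance (s : String) (index : Int) : Decidable (Pre_recursive_capital_letters s index) := by
  unfold Pre_recursive_capital_letters; infer_instance

def pvWitness_recursive_capital_letters : String × Int := ("ab", 0)

def Spec_recursive_capital_letters (s : String) (index : Int) (out : List String) : Prop := out = recursive_capital_letters_alt s index
instance (s : String) (index : Int) (out : List String) : Decidable (Spec_recursive_capital_letters s index out) := by unfold Spec_recursive_capital_letters; infer_instance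

-- ===== CLAIM (what is proved, stated in full; the proofs are below) =====
def Claim_equal_recursive_capital_letters : Prop := ∀ (s : String) (index : Int), Dom_recursive_capital_letters s index → Pre_recursive_capital_letters s index → Spec_recursive_capital_letters s index (recursive_capital_letters s index)

-- ===== LEMMAS AND PROOFS =====

def pvCapOrSp (c : Char) : Bool := pvIsCapB c || c == ' '

theorem pvCap_iff (c : Char) : (64 < c.toNat ∧ c.toNat < 91) ↔ pvIsCapB c = true := by
  simp only [pvIsCapB, Bool.and_eq_true, decide_eq_true_eq, Char.le_def, UInt32.le_iff_toNat_le]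
  have h1 : ('A').val.toNat = 65 := rfl
  have h2 : ('Z').val.toNat = 90 := rfl
  rw [h1, h2]
  show (64 < c.val.toNat ∧ c.val.toNat < 91) ↔ _
  omega

theorem pvEraseMid {α : Type} (pre : List α) (c : α) (ft : List α) :
    (pre ++ c :: ft).eraseIdx pre.length = pre ++ ft := by
  induction pre with
  | nil => rfl
  | cons p ps ih => simpa using ih

theorem pvPopMid {α : Type} (pre : List α) (c : α) (ft : List α) :
    PySem.List.pop? (pre ++ c :: ft) (pre.length : Int) = some (c, pre ++ ft) := by
  rw [PySem.List.pop?_natCast _ _ (by simp only [List.length_append, List.length_cons]; omega)]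
  rw [pvEraseMid, List.getElem_of_append rfl rfl]

-- the loop invariant: A's recursion on state  caps.reverse ++ rest ++ front  with the
-- cursor at the caps/rest–front boundary computes B's two filters, provided no space
-- in front is reached while rest ends in nothing or a capital (hsafe)
theorem pvMain (front caps rest : List Char)
    (hsafe : (∃ xs x, rest = xs ++ [x] ∧ pvIsCapB x = false ∧ x ≠ ' ') ∨
             ' ' ∉ front.takeWhile pvCapOrSp) :
    pvRecAuxA (caps.reverse ++ rest ++ front) ((caps.length + rest.length : Nat) : Int)
      = (caps ++ front.filter pvIsCapB).reverse ++ rest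
          ++ front.filter (fun c => !pvIsCapB c && !(c == ' ')) := by
  induction front generalizing caps rest with
  | nil =>
    rw [pvRecAuxA]
    simp only [List.append_nil, List.filter_nil]
    split
    · rfl
    · rw [if_neg (by simp)]
  | cons c ft ih =>
    by_cases hsmall : (caps.reverse ++ rest ++ (c :: ft)).length = 0
        ∨ (caps.reverse ++ rest ++ (c :: ft)).length = 1
    · -- total length ≤ 1: everything is empty but c
      have hz : caps.length = 0 ∧ rest.length = 0 ∧ ft.length = 0 := by
        rcases hsmall with h | h <;>
          (simp only [List.length_append, List.length_reverse, List.length_cons] at h; omega)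
      obtain ⟨rfl, rfl, rfl⟩ : caps = [] ∧ rest = [] ∧ ft = [] :=
        ⟨List.eq_nil_of_length_eq_zero hz.1, List.eq_nil_of_length_eq_zero hz.2.1,
         List.eq_nil_of_length_eq_zero hz.2.2⟩
      have hcne : c ≠ ' ' := by
        rcases hsafe with ⟨xs, x, hx, _⟩ | hs
        · cases xs <;> simp at hx
        · intro h; subst h; simp [pvCapOrSp] at hs
      rw [pvRecAuxA, if_pos (by simp)]
      by_cases hcap : pvIsCapB c = true
      · simp [hcap]
      · simp [hcne, hcap]
    · -- length ≥ 2
      have hget : PySem.List.pyGet? (caps.reverse ++ rest ++ (c :: ft))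
          ((caps.length + rest.length : Nat) : Int) = some c := by
        rw [show ((caps.length + rest.length : Nat) : Int) = ((caps.reverse ++ rest).length : Nat) from by simp]
        exact PySem.List.pyGet?_append_length _ _ _
      rw [pvRecAuxA, if_neg hsmall,
        if_pos (by
          simp only [List.length_append, List.length_reverse, List.length_cons]
          push_cast; omega)]
      split
      · next heq => rw [hget] at heq; cases heq
      · next letter heq =>
        rw [hget] at heq
        injection heq with hinj
        subst hinj
        have hpop : PySem.List.pop? (caps.reverse ++ rest ++ (c :: ft))
            ((caps.length + rest.length : Nat) : Int) = some (c, (caps.reverse ++ rest) ++ ft) := by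
          rw [show ((caps.length + rest.length : Nat) : Int) = ((caps.reverse ++ rest).length : Nat) from by simp]
          exact pvPopMid _ _ _
        by_cases hcsp : c = ' '
        · -- ===== space: pop it, step back, re-skip rest's last character =====
          subst hcsp
          rw [if_pos rfl]
          split
          · next heq2 => rw [hpop] at heq2; cases heq2
          · next x0 s' heq2 =>
            rw [hpop] at heq2
            obtain ⟨rfl, rfl⟩ : x0 = ' ' ∧ (caps.reverse ++ rest) ++ ft = s' := by
              injection heq2 with h; exact ⟨(congrArg Prod.fst h).symm, congrArg Prod.snd h⟩
            obtain ⟨xs, x, rfl, hxc, hxs⟩ :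
                ∃ xs x, rest = xs ++ [x] ∧ pvIsCapB x = false ∧ x ≠ ' ' := by
              rcases hsafe with h | hs
              · exact h
              · exfalso; simp [pvCapOrSp] at hs
            have hshape : (caps.reverse ++ (xs ++ [x])) ++ ft
                = (caps.reverse ++ xs) ++ (x :: ft) := by simp
            have hidx2 : ((caps.length + (xs ++ [x]).length : Nat) : Int) - 1
                = (((caps.reverse ++ xs).length : Nat) : Int) := by simp; omega
            rw [hshape, hidx2]
            by_cases h1 : ((caps.reverse ++ xs) ++ (x :: ft)).length = 0
                ∨ ((caps.reverse ++ xs) ++ (x :: ft)).length = 1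
            · -- shrunk to the single surviving character x
              have hz : caps.length = 0 ∧ xs.length = 0 ∧ ft.length = 0 := by
                rcases h1 with h | h <;>
                  (simp only [List.length_append, List.length_reverse, List.length_cons] at h; omega)
              obtain ⟨rfl, rfl, rfl⟩ : caps = [] ∧ xs = [] ∧ ft = [] :=
                ⟨List.eq_nil_of_length_eq_zero hz.1, List.eq_nil_of_length_eq_zero hz.2.1,
                 List.eq_nil_of_length_eq_zero hz.2.2⟩
              rw [pvRecAuxA, if_pos (by simp)]
              simp [pvIsCapB]
            · rw [pvRecAuxA, if_neg h1,
                if_pos (by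
                  simp only [List.length_append, List.length_reverse, List.length_cons]
                  push_cast; omega)]
              have hget2 : PySem.List.pyGet? ((caps.reverse ++ xs) ++ (x :: ft))
                  (((caps.reverse ++ xs).length : Nat) : Int) = some x :=
                PySem.List.pyGet?_append_length _ _ _
              split
              · next heq3 => rw [hget2] at heq3; cases heq3
              · next letter2 heq3 =>
                rw [hget2] at heq3
                injection heq3 with hinj3
                subst hinj3
                rw [if_neg hxs, if_neg (by rw [pvCap_iff]; simp [hxc])]
                have hshape2 : (caps.reverse ++ xs) ++ (x :: ft)
                    = caps.reverse ++ (xs ++ [x]) ++ ft := by simp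
                have hidx3 : (((caps.reverse ++ xs).length : Nat) : Int) + 1
                    = ((caps.length + (xs ++ [x]).length : Nat) : Int) := by simp; omega
                rw [hshape2, hidx3]
                rw [ih caps (xs ++ [x]) (Or.inl ⟨xs, x, rfl, hxc, hxs⟩)]
                simp [pvIsCapB]
        · -- ===== not a space =====
          rw [if_neg hcsp]
          by_cases hcap : pvIsCapB c = true
          · rw [if_pos ((pvCap_iff c).mpr hcap)]
            split
            · next heq4 => rw [hpop] at heq4; cases heq4
            · next x2 s2 heq4 =>
              rw [hpop] at heq4
              obtain ⟨rfl, rfl⟩ : c = x2 ∧ (caps.reverse ++ rest) ++ ft = s2 := by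
                injection heq4 with h; exact ⟨congrArg Prod.fst h, congrArg Prod.snd h⟩
              rw [PySem.List.insert_zero]
              have hstep := ih (caps ++ [c]) rest
                (by
                  rcases hsafe with h | hs
                  · exact Or.inl h
                  · right
                    simp only [List.takeWhile_cons, pvCapOrSp, hcap, Bool.true_or] at hs ⊢
                    intro h; exact hs (List.mem_cons_of_mem _ h))
              have hshape2 : (caps ++ [c]).reverse ++ rest ++ ft
                  = c :: ((caps.reverse ++ rest) ++ ft) := by simp
              have hidx3 : (((caps ++ [c]).length + rest.length : Nat) : Int)
                  = ((caps.length + rest.length : Nat) : Int) + 1 := by simp; omega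
              rw [hshape2, hidx3] at hstep
              rw [hstep]
              simp [hcap]
          · have hcapf : pvIsCapB c = false := Bool.eq_false_iff.mpr hcap
            rw [if_neg (by rw [pvCap_iff]; simp [hcapf])]
            have hshape2 : caps.reverse ++ rest ++ (c :: ft)
                = caps.reverse ++ (rest ++ [c]) ++ ft := by simp
            have hidx3 : ((caps.length + rest.length : Nat) : Int) + 1
                = ((caps.length + (rest ++ [c]).length : Nat) : Int) := by simp; omega
            rw [hshape2, hidx3]
            rw [ih caps (rest ++ [c]) (Or.inl ⟨rest, c, rfl, hcapf, hcsp⟩)]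
            simp [hcsp, hcap]

theorem recursive_capital_letters_spec : Claim_equal_recursive_capital_letters := by
  intro s index _ hpre
  unfold Spec_recursive_capital_letters recursive_capital_letters recursive_capital_letters_alt
  by_cases hlen : s.toList.length ≤ 1
  · rw [if_pos hlen, pvRecAuxA, if_pos (by omega)]
  · rw [if_neg hlen]
    rcases hpre with h | ⟨h0, hle, hsafe0⟩
    · omega
    have htk : (s.toList.take index.toNat).length = index.toNat := by
      rw [List.length_take]; omega
    have hidx : ((0 + (s.toList.take index.toNat).length : Nat) : Int) = index := by
      rw [htk]; omega
    have hsafe : (∃ xs x, s.toList.take index.toNat = xs ++ [x] ∧ pvIsCapB x = false ∧ x ≠ ' ') ∨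
        ' ' ∉ (s.toList.drop index.toNat).takeWhile pvCapOrSp := by
      rcases hsafe0 with hL | hs
      · left
        cases hg : (s.toList.take index.toNat).getLast? with
        | none => rw [hg] at hL; simp at hL
        | some x =>
          rw [hg] at hL
          simp only [Option.any_some, Bool.and_eq_true, Bool.not_eq_true',
            beq_eq_false_iff_ne] at hL
          obtain ⟨xs, hxs⟩ := List.getLast?_eq_some_iff.mp hg
          exact ⟨xs, x, hxs, hL.1, hL.2⟩
      · right
        have : pvCapOrSp = (fun c => (decide ('A' ≤ c) && decide (c ≤ 'Z')) || c == ' ') := by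
          funext c; simp [pvCapOrSp, pvIsCapB]
        rw [this]; exact hs
    have hmain := pvMain (s.toList.drop index.toNat) [] (s.toList.take index.toNat) hsafe
    simp only [List.reverse_nil, List.nil_append, List.length_nil, hidx,
      List.take_append_drop] at hmain
    rw [PySem.List.slice_to s.toList h0, PySem.List.slice_from s.toList h0]
    rw [hmain]
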